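-- pv_equiv track=rewrite | github.com/YichenZW/MGTDetect_Baseline_Cleaned | preprocessed_data/grover.py | get_train_idx_by_label
-- ===== SOURCE A (Python) =====
-- def get_train_idx_by_label(train_data):
--     for i in range(len(train_data)):
--         if train_data[i]['label'] == 'human':
--             train_data[i]['title'] = 0
--         else:
--             train_data[i]['title'] = 1
--     train_idx_by_label = {}
--     for i in range(2):
--         train_idx_by_label[i] = [idx for idx in range(
--             len(train_data)) if train_data[idx]['title'] == i]
--
--     return train_idx_by_label
-- ===== SOURCE B (Python) =====
-- def get_train_idx_by_label(train_data):
--     zeros, ones = [], []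
--     for i, record in enumerate(train_data):
--         if record['label'] == 'human':
--             record['title'] = 0
--             zeros.append(i)
--         else:
--             record['title'] = 1
--             ones.append(i)
--     return {0: zeros, 1: ones}
-- ===== Notes on version B (the rewrite author's own statement) =====
-- stated objective: simpler
-- what changed: One dispatching pass over enumerate(train_data) builds both label-index buckets (and sets 'title') at once, replacing A's labeling loop followed by two separate filtering comprehensions over all indices.
import Mathlib
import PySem

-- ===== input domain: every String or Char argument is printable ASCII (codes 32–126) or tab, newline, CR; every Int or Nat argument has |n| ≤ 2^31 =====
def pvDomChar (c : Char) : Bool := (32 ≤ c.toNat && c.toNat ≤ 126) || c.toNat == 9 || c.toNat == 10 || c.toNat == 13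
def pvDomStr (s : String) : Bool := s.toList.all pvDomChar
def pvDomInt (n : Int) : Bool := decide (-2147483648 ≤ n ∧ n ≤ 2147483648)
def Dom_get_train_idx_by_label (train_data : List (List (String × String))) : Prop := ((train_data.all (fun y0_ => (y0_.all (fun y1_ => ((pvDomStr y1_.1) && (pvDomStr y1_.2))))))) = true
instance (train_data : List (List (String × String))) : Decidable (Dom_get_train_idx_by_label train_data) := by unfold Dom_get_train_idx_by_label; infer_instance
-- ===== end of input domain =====

-- B fuses A's labeling loop and its two per-label filtering comprehensions into one
-- dispatching pass (objective: simpler). Both A and B also mutate the input records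
-- (setting 'title'); the equivalence proved here is about the RETURN value only.

-- ===== PORT A =====
-- rec['label'] == 'human' ? 0 : 1 ; the getD "" default is only reached outside Pre_
-- (a record without a 'label' key, where the Python raises KeyError).
def pvTitle (rec : List (String × String)) : Int :=
  if (PySem.Dict.get? (PySem.Dict.mk rec) "label").getD "" = "human" then 0 else 1

-- first loop: train_data[i]['title'] = 0/1; we keep the titles as a parallel list
-- (the Lean value convention cannot store an int inside a String-valued record),
-- then the 'for i in range(2)' loop fills the dict with the two comprehensions.
def get_train_idx_by_label (train_data : List (List (String × String))) : List (Int × List Int) :=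
  let titles : List Int := train_data.map pvTitle
  ((PySem.List.pyRange 0 2 1).foldl
    (fun d i => PySem.Dict.insert d i
      (((List.range train_data.length).filter (fun idx => titles[idx]? = some i)).map
        (fun idx => (idx : Int))))
    PySem.Dict.empty).items

-- ===== PORT B =====
-- single pass over enumerate(train_data): dispatch each index into its bucket
def pvBLoop : List (List (String × String)) → Nat → List Int → List Int → List Int × List Int
  | [], _, zeros, ones => (zeros, ones)
  | rec :: rest, i, zeros, ones =>
    if (PySem.Dict.get? (PySem.Dict.mk rec) "label").getD "" = "human"
    then pvBLoop rest (i + 1) (zeros ++ [(i : Int)]) ones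
    else pvBLoop rest (i + 1) zeros (ones ++ [(i : Int)])

def get_train_idx_by_label_alt (train_data : List (List (String × String))) : List (Int × List Int) :=
  match pvBLoop train_data 0 [] [] with
  | (zeros, ones) => [(0, zeros), (1, ones)]

-- ===== PRECONDITION & SPEC =====
-- Pre_ excludes records without a 'label' key, on which the Python A raises KeyError.
def Pre_get_train_idx_by_label (train_data : List (List (String × String))) : Prop :=
  ∀ rec ∈ train_data, "label" ∈ rec.map Prod.fst

instance (train_data : List (List (String × String))) : Decidable (Pre_get_train_idx_by_label train_data) := by unfold Pre_get_train_idx_by_label; infer_instance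

def pvWitness_get_train_idx_by_label : (List (List (String × String))) :=
  [[("label", "human")], [("label", "machine")], [("label", "human"), ("title", "x")]]

def Spec_get_train_idx_by_label (train_data : List (List (String × String))) (out : List (Int × List Int)) : Prop := out = get_train_idx_by_label_alt train_data
instance (train_data : List (List (String × String))) (out : List (Int × List Int)) : Decidable (Spec_get_train_idx_by_label train_data out) := by unfold Spec_get_train_idx_by_label; infer_instance

-- ===== CLAIM (what is proved, stated in full; the proofs are below) =====
def Claim_equal_get_train_idx_by_label : Prop := ∀ (train_data : List (List (String × String))), Dom_get_train_idx_by_label train_data → Pre_get_train_idx_by_label train_data → Spec_get_train_idx_by_label train_data (get_train_idx_by_label train_data)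

-- ===== LEMMAS AND PROOFS =====

-- indices (offset by k) of the records whose title is b, in order
def pvIdxs (b : Int) : List (List (String × String)) → Nat → List Int
  | [], _ => []
  | rec :: rest, k => (if pvTitle rec = b then [(k : Int)] else []) ++ pvIdxs b rest (k + 1)

theorem pvBLoop_spec (td : List (List (String × String))) :
    ∀ (k : Nat) (zs os : List Int),
      pvBLoop td k zs os = (zs ++ pvIdxs 0 td k, os ++ pvIdxs 1 td k) := by
  induction td with
  | nil => intro k zs os; simp [pvBLoop, pvIdxs]
  | cons rec rest ih =>
    intro k zs os
    by_cases h : (PySem.Dict.get? (PySem.Dict.mk rec) "label").getD "" = "human" <;>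
      simp [pvBLoop, pvIdxs, pvTitle, h, ih]

theorem pvIdxs_eq_filter (b : Int) (td : List (List (String × String))) :
    ∀ (k : Nat),
      pvIdxs b td k =
        ((List.range td.length).filter (fun idx => (td.map pvTitle)[idx]? = some b)).map
          (fun idx => ((idx + k : Nat) : Int)) := by
  induction td with
  | nil => intro k; simp [pvIdxs]
  | cons rec rest ih =>
    intro k
    simp only [pvIdxs, List.length_cons, List.range_succ_eq_map, List.filter_cons,
      List.filter_map, List.map_cons, List.getElem?_cons_zero]
    rw [ih (k + 1)]
    by_cases h : pvTitle rec = b <;>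
      simp [h, Function.comp_def] <;> (intros; omega)

-- ===== VERDICT (by name: the statement is the Claim_ definition above) =====

theorem get_train_idx_by_label_spec : Claim_equal_get_train_idx_by_label := by
  intro td _ _
  unfold Spec_get_train_idx_by_label get_train_idx_by_label get_train_idx_by_label_alt
  rw [pvBLoop_spec td 0 [] []]
  have h2 : PySem.List.pyRange 0 2 1 = [0, 1] := by decide
  rw [h2]
  simp only [List.foldl_cons, List.foldl_nil]
  rw [PySem.Dict.items_insert_of_not_contains _ _ (by
    simp [PySem.Dict.contains_insert, PySem.Dict.contains_empty])]
  rw [PySem.Dict.items_insert_of_not_contains _ _ (PySem.Dict.contains_empty _)]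
  rw [pvIdxs_eq_filter 0 td 0, pvIdxs_eq_filter 1 td 0]
  simp [PySem.Dict.empty]
  exact ⟨(List.map_eq_flatMap).symm, (List.map_eq_flatMap).symm⟩
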